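-- pv_equiv track=rewrite | github.com/jd1t25/aoc | 2023/d14/2.py | neg
-- ===== SOURCE A (Python) =====
-- def neg(mirrors):
--     i = len(mirrors)-1
--     mirrors = list(mirrors)
--     while i > 0:
--         j = i
--         count = 0
--         while mirrors[i] != '#':
--             if mirrors[i] == 'O':
--                 count += 1
--                 mirrors[i] = '.'
--             i -= 1
--             if i < 0:
--                 break
--         if count != 0:
--             for k in range(j,j-count,-1):
--                 mirrors[k] = 'O'
--         i -= 1
--     return mirrors
-- ===== SOURCE B (Python) =====
-- def _roll(seg):
--     # pack the 'O' rocks to the right end of a '#'-free run; every other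
--     # cell keeps its character (O's become '.'), trailing cells overwritten
--     c = seg.count('O')
--     return [('.' if x == 'O' else x) for x in seg][:len(seg) - c] + ['O'] * c
--
--
-- def neg(mirrors):
--     out = []
--     seg = []
--     for x in mirrors:
--         if x == '#':
--             out += _roll(seg) + ['#']
--             seg = []
--         else:
--             seg.append(x)
--     return out + _roll(seg)
-- ===== Notes on version B (the rewrite author's own statement) =====
-- stated objective: simpler
-- what changed: A's single interleaved right-to-left two-pointer scan (inner while over the list index with in-place blanking and a back-fill for-loop) is replaced by a one-pass split of the row into '#'-delimited runs, each run transformed independently (count the O's, blank them, truncate, append 'O'*count) and rejoined.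
import Mathlib
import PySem

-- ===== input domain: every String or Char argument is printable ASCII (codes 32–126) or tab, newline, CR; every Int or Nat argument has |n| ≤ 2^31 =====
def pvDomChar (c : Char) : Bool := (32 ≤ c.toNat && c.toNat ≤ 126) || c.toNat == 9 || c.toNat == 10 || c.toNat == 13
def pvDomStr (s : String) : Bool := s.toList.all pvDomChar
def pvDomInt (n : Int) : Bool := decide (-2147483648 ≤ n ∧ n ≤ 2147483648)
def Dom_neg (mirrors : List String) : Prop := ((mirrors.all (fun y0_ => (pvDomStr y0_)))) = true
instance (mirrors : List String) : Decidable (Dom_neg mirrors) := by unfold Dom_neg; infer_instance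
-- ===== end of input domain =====

-- B replaces A's right-to-left two-pointer scan with back-fill by a split-on-'#'
-- runs-then-map decomposition (objective: simpler). Both are pure (A copies its
-- argument before mutating) and total, so there is no Pre_.

-- ===== PORT A =====
-- inner while loop `while mirrors[i] != '#': …` threading (list, i, count);
-- the `0 ≤ i` guard only makes the always-in-range access total
def negInner (m : List String) (i : Int) (count : Int) : List String × Int × Int :=
  if h : 0 ≤ i ∧ PySem.List.pyGetD m i "" ≠ "#" then
    let x := PySem.List.pyGetD m i ""
    let m' := if x = "O" then PySem.List.pySetD m i "." else m
    let count' := if x = "O" then count + 1 else count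
    if i - 1 < 0 then (m', i - 1, count')
    else negInner m' (i - 1) count'
  else (m, i, count)
termination_by i.toNat
decreasing_by omega

-- outer while loop `while i > 0:` with the `for k in range(j, j-count, -1)` back-fill;
-- the fuel counter (one unit per iteration, `i` strictly decreases so it never runs out)
-- only makes the loop total
def negOuterGo (fuel : Nat) (m : List String) (i : Int) : List String :=
  match fuel with
  | 0 => m
  | fuel + 1 =>
    if 0 < i then
      let r := negInner m i 0
      let m'' := if r.2.2 ≠ 0 then
          (PySem.List.pyRange i (i - r.2.2) (-1)).foldl
            (fun acc k => PySem.List.pySetD acc k "O") r.1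
        else r.1
      negOuterGo fuel m'' (r.2.1 - 1)
    else m

def neg (mirrors : List String) : List String :=
  negOuterGo ((((mirrors.length : Int) - 1).toNat) + 1) mirrors ((mirrors.length : Int) - 1)

-- ===== PORT B =====
-- roll one '#'-free run: count the 'O's, blank them, keep the first len-c cells
-- ([:len(seg)-c], exact as List.take since 0 ≤ len-c) and append 'O'*c
def rollSeg (seg : List String) : List String :=
  let c := seg.count "O"
  (seg.map (fun x => if x = "O" then "." else x)).take (seg.length - c)
    ++ List.replicate c "O"

def negAltStep (p : List String × List String) (x : String) : List String × List String :=
  if x = "#" then (p.1 ++ rollSeg p.2 ++ ["#"], []) else (p.1, p.2 ++ [x])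

def neg_alt (mirrors : List String) : List String :=
  let p := mirrors.foldl negAltStep ([], [])
  p.1 ++ rollSeg p.2

-- ===== PRECONDITION & SPEC =====
def Spec_neg (mirrors : List String) (out : List String) : Prop := out = neg_alt mirrors
instance (mirrors : List String) (out : List String) : Decidable (Spec_neg mirrors out) := by unfold Spec_neg; infer_instance

-- ===== CLAIM (what is proved, stated in full; the proofs are below) =====
def Claim_equal_neg : Prop := ∀ (mirrors : List String), Dom_neg mirrors → Spec_neg mirrors (neg mirrors)

-- ===== LEMMAS AND PROOFS =====

theorem negInner_append (m r : List String) (i c : Int)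
    (h0 : 0 ≤ i) (hi : i < (m.length : Int)) :
    negInner (m ++ r) i c =
      ((negInner m i c).1 ++ r, (negInner m i c).2.1, (negInner m i c).2.2) := by
  have key : ∀ n : Nat, ∀ (m r : List String) (i c : Int), i.toNat ≤ n → 0 ≤ i → i < (m.length : Int) →
      negInner (m ++ r) i c =
      ((negInner m i c).1 ++ r, (negInner m i c).2.1, (negInner m i c).2.2) := by
    intro n
    induction n with
    | zero =>
      intro m r i c hn h0 hi
      have hi0 : i = 0 := by omega
      subst hi0
      have hget : PySem.List.pyGetD (m ++ r) 0 "" = PySem.List.pyGetD m 0 "" := by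
        rw [PySem.List.pyGetD_eq_getElem _ _ (by omega) (by simp only [List.length_append]; push_cast; omega),
            PySem.List.pyGetD_eq_getElem _ _ (by omega) hi]
        exact List.getElem_append_left (by omega)
      rw [negInner, negInner]
      simp only [hget]
      split
      · simp only [if_pos (by omega : (0:Int) - 1 < 0)]
        split
        · rw [PySem.List.pySetD_of_nonneg _ _ (by omega), PySem.List.pySetD_of_nonneg _ _ (by omega),
              List.set_append_left _ _ (by exact_mod_cast hi)]
        · rfl
      · rfl
    | succ n ih =>
      intro m r i c hn h0 hi
      have hget : PySem.List.pyGetD (m ++ r) i "" = PySem.List.pyGetD m i "" := by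
        rw [PySem.List.pyGetD_eq_getElem _ _ h0 (by simp only [List.length_append]; push_cast; omega),
            PySem.List.pyGetD_eq_getElem _ _ h0 hi]
        exact List.getElem_append_left (by omega)
      have hset : PySem.List.pySetD (m ++ r) i "." = PySem.List.pySetD m i "." ++ r := by
        rw [PySem.List.pySetD_of_nonneg _ _ h0, PySem.List.pySetD_of_nonneg _ _ h0,
            List.set_append_left _ _ (by omega)]
      rw [negInner, negInner]
      simp only [hget]
      split
      · split
        · split
          · rw [hset]
          · rfl
        · rename_i hcond hlt
          split
          · rename_i hO
            rw [hset]
            rw [ih (PySem.List.pySetD m i ".") r (i-1) (c+1) (by omega) (by omega)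
                (by simp [PySem.List.length_pySetD]; omega)]
          · rename_i hO
            rw [ih m r (i-1) c (by omega) (by omega) (by omega)]
      · rfl
  exact key i.toNat m r i c le_rfl h0 hi



def dotc (x : String) : String := if x = "O" then "." else x

theorem negInner_step (p : List String) (x : String) (c : Int) (hx : x ≠ "#") :
    negInner (p ++ [x]) ((p.length : Int)) c =
      if (p.length : Int) - 1 < 0 then
        (p ++ [dotc x], (p.length : Int) - 1, c + (if x = "O" then 1 else 0))
      else negInner (p ++ [dotc x]) ((p.length : Int) - 1) (c + (if x = "O" then 1 else 0)) := by
  have hget : PySem.List.pyGetD (p ++ [x]) ((p.length : Int)) "" = x := by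
    simp [List.getD_eq_getElem?_getD]
  have hset : PySem.List.pySetD (p ++ [x]) ((p.length : Int)) "." = p ++ ["."] := by
    simp only [PySem.List.pySetD_natCast]
    rw [List.set_append_right _ _ (le_refl _)]
    simp
  rw [negInner]
  rw [dif_pos ⟨by omega, by rw [hget]; exact hx⟩]
  simp only [hget, hset]
  by_cases hO : x = "O" <;> simp [hO, dotc]

theorem negInner_none (u : List String) (x : String) (c : Int) (hu : "#" ∉ u) (hx : x ≠ "#") :
    negInner (u ++ [x]) ((u.length : Int)) c =
      ((u ++ [x]).map dotc, -1, c + (((u ++ [x]).count "O" : Nat) : Int)) := by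
  induction u using List.reverseRecOn generalizing x c with
  | nil =>
    rw [negInner_step [] x c hx]
    by_cases hO : x = "O" <;> simp [hO, dotc]
  | append_singleton t y ih =>
    have hy : y ≠ "#" := by intro h; exact hu (by simp [h])
    have ht : "#" ∉ t := fun h => hu (by simp [h])
    rw [negInner_step (t ++ [y]) x c hx]
    rw [if_neg (by simp only [List.length_append, List.length_cons, List.length_nil]; push_cast; omega)]
    have hlen : ((t ++ [y]).length : Int) - 1 = (t.length : Int) := by simp
    rw [hlen]
    have happ : t ++ [y] ++ [dotc x] = (t ++ [y]) ++ [dotc x] := rfl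
    rw [happ, negInner_append (t ++ [y]) [dotc x] (t.length : Int) _ (by omega) (by simp)]
    rw [show ((t.length : Int)) = ((t.length : Int)) from rfl]
    rw [ih y _ ht hy]
    by_cases hO : x = "O" <;> by_cases hOy : y = "O" <;>
      simp [hO, hOy, dotc, List.count_append] <;> omega

theorem negInner_hash (q u : List String) (c : Int) (hu : "#" ∉ u) :
    negInner (q ++ "#" :: u) ((q.length : Int) + (u.length : Int)) c =
      (q ++ "#" :: u.map dotc, (q.length : Int), c + ((u.count "O" : Nat) : Int)) := by
  induction u using List.reverseRecOn generalizing c with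
  | nil =>
    have hidx : (q.length : Int) + (([] : List String).length : Int) = (q.length : Int) := by simp
    rw [hidx, negInner]
    rw [dif_neg (fun h => h.2 (by simp [List.getD_eq_getElem?_getD]))]
    simp
  | append_singleton t x ih =>
    have hx : x ≠ "#" := by intro h; exact hu (by simp [h])
    have ht : "#" ∉ t := fun h => hu (by simp [h])
    have hsplit : q ++ "#" :: (t ++ [x]) = (q ++ "#" :: t) ++ [x] := by simp
    have hidx : (q.length : Int) + ((t ++ [x]).length : Int) = (((q ++ "#" :: t).length : Int)) := by
      simp only [List.length_append, List.length_cons, List.length_nil]; push_cast; omega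
    rw [hsplit, hidx, negInner_step (q ++ "#" :: t) x c hx]
    rw [if_neg (by simp only [List.length_append, List.length_cons]; push_cast; omega)]
    have hidx2 : (((q ++ "#" :: t).length : Int)) - 1 = (q.length : Int) + (t.length : Int) := by
      simp only [List.length_append, List.length_cons]; push_cast; omega
    rw [hidx2]
    rw [show (q ++ "#" :: t) ++ [dotc x] = (q ++ "#" :: t) ++ [dotc x] from rfl]
    rw [negInner_append (q ++ "#" :: t) [dotc x] _ _ (by omega) (by simp only [List.length_append, List.length_cons]; push_cast; omega)]
    rw [ih _ ht]
    by_cases hO : x = "O" <;> simp [hO, dotc, List.count_append] ; omega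

theorem backfill_eq (v : List String) (c : Nat) (hc : c ≤ v.length) :
    (PySem.List.pyRange ((v.length : Int) - 1) ((v.length : Int) - 1 - c) (-1)).foldl
        (fun acc k => PySem.List.pySetD acc k "O") v =
      v.take (v.length - c) ++ List.replicate c "O" := by
  rw [PySem.List.pyRange_neg_one]
  rw [show (((v.length : Int) - 1) - ((v.length : Int) - 1 - c)).toNat = c by omega]
  rw [List.foldl_map]
  induction c with
  | zero => simp
  | succ c ih =>
    have hc' : c ≤ v.length := by omega
    rw [List.range_succ, List.foldl_append, ih hc']
    simp only [List.foldl_cons, List.foldl_nil]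
    rw [PySem.List.pySetD_of_nonneg _ _ (by omega : (0:Int) ≤ (v.length : Int) - 1 - c)]
    rw [show (((v.length : Int) - 1 - c)).toNat = v.length - 1 - c by omega]
    rw [List.set_append_left _ _ (by simp [List.length_take]; omega)]
    rw [List.set_eq_take_cons_drop _ (by simp [List.length_take]; omega)]
    rw [List.take_take]
    rw [show min (v.length - 1 - c) (v.length - c) = v.length - (c+1) by omega]
    rw [List.drop_take]
    rw [show v.length - 1 - c + 1 = v.length - c by omega]
    simp [List.replicate_succ]

theorem negInner_bounds (m : List String) (i c : Int) :
    (negInner m i c).2.2 ≤ c + i - (negInner m i c).2.1 ∧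
    (0 ≤ i → -1 ≤ (negInner m i c).2.1) ∧ c ≤ (negInner m i c).2.2 := by
  fun_induction negInner m i c with
  | case1 m i c h x m' c' hlt =>
    simp only [Prod.snd]
    refine ⟨?_, fun _ => by omega, ?_⟩ <;> simp only [c'] <;> split <;> omega
  | case2 m i c h x m' c' hlt ih =>
    obtain ⟨h1, h2, h3⟩ := ih
    refine ⟨?_, fun _ => h2 (by omega), ?_⟩ <;>
      simp only [c'] at h1 h3 ⊢ <;> revert h1 h3 <;> split <;> omega
  | case3 m i c h =>
    simp only [Prod.snd]
    exact ⟨by omega, fun h0 => by omega, le_refl _⟩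

theorem negInner_length (m : List String) (i c : Int) :
    (negInner m i c).1.length = m.length := by
  fun_induction negInner m i c with
  | case1 m i c h x m' c' hlt =>
    simp only [m']; split <;> simp [PySem.List.length_pySetD]
  | case2 m i c h x m' c' hlt ih =>
    rw [ih]; simp only [m']; split <;> simp [PySem.List.length_pySetD]
  | case3 m i c h => rfl

theorem foldl_pySetD_append (l : List Int) (w r : List String)
    (hl : ∀ k ∈ l, 0 ≤ k ∧ k < (w.length : Int)) :
    l.foldl (fun a k => PySem.List.pySetD a k "O") (w ++ r) =
      l.foldl (fun a k => PySem.List.pySetD a k "O") w ++ r := by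
  induction l generalizing w with
  | nil => rfl
  | cons k l ih =>
    obtain ⟨hk0, hkw⟩ := hl k (by simp)
    simp only [List.foldl_cons]
    rw [PySem.List.pySetD_of_nonneg _ _ hk0, PySem.List.pySetD_of_nonneg _ _ hk0,
        List.set_append_left _ _ (by omega)]
    exact ih _ (fun k' hk' => by
      have := hl k' (by simp [hk'])
      simpa [List.length_set] using this)

theorem foldl_pySetD_length (l : List Int) (w : List String) :
    (l.foldl (fun a k => PySem.List.pySetD a k "O") w).length = w.length := by
  induction l generalizing w with
  | nil => rfl
  | cons k l ih => simp [ih, PySem.List.length_pySetD]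

-- the inner loop never moves `i` up
theorem negInner_i_le (m : List String) (i c : Int) : (negInner m i c).2.1 ≤ i := by
  fun_induction negInner m i c with
  | case1 m i c h x m' c' hlt => simp
  | case2 m i c h x m' c' hlt ih => exact le_trans ih (by omega)
  | case3 m i c h => simp

theorem negOuterGo_nonpos (f : Nat) (m : List String) (i : Int) (hi : i ≤ 0) :
    negOuterGo f m i = m := by
  cases f with
  | zero => rfl
  | succ f => rw [negOuterGo, if_neg (by omega)]

theorem negOuterGo_append (f : Nat) (m r : List String) (i : Int) (hi : i < (m.length : Int)) :
    negOuterGo f (m ++ r) i = negOuterGo f m i ++ r := by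
  induction f generalizing m r i with
  | zero => rfl
  | succ f ih =>
    by_cases hpos : 0 < i
    · conv_lhs => rw [negOuterGo]
      conv_rhs => rw [negOuterGo]
      rw [if_pos hpos, if_pos hpos]
      have hA := negInner_append m r i 0 (by omega) hi
      obtain ⟨hb1, hb2, hb3⟩ := negInner_bounds m i 0
      have hneg1 : -1 ≤ (negInner m i 0).2.1 := hb2 (by omega)
      have hle := negInner_i_le m i 0
      have hmem : ∀ k ∈ PySem.List.pyRange i (i - (negInner m i 0).2.2) (-1),
          0 ≤ k ∧ k < (((negInner m i 0).1).length : Int) := by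
        intro k hk
        rw [PySem.List.mem_pyRange_neg_one] at hk
        rw [negInner_length]
        omega
      simp only [hA]
      by_cases hc : (negInner m i 0).2.2 ≠ 0
      · simp only [if_pos hc]
        rw [foldl_pySetD_append _ _ _ hmem]
        exact ih (List.foldl (fun acc k => PySem.List.pySetD acc k "O") (negInner m i 0).1
              (PySem.List.pyRange i (i - (negInner m i 0).2.2) (-1))) r
            ((negInner m i 0).2.1 - 1)
            (by rw [foldl_pySetD_length, negInner_length]; omega)
      · simp only [if_neg hc]
        exact ih (negInner m i 0).1 r ((negInner m i 0).2.1 - 1)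
          (by rw [negInner_length]; omega)
    · rw [negOuterGo_nonpos _ _ _ (by omega), negOuterGo_nonpos _ _ _ (by omega)]

theorem negOuterGo_fuel (f g : Nat) (m : List String) (i : Int)
    (hf : i.toNat < f) (hg : i.toNat < g) : negOuterGo f m i = negOuterGo g m i := by
  induction f generalizing g m i with
  | zero => omega
  | succ f ih =>
    cases g with
    | zero => omega
    | succ g =>
      by_cases hpos : 0 < i
      · conv_lhs => rw [negOuterGo]
        conv_rhs => rw [negOuterGo]
        rw [if_pos hpos, if_pos hpos]
        have hle := negInner_i_le m i 0
        obtain ⟨hb1, hb2, hb3⟩ := negInner_bounds m i 0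
        have hneg1 : -1 ≤ (negInner m i 0).2.1 := hb2 (by omega)
        exact ih g _ ((negInner m i 0).2.1 - 1) (by omega) (by omega)
      · rw [negOuterGo_nonpos _ _ _ (by omega), negOuterGo_nonpos _ _ _ (by omega)]

theorem rollSeg_eq_dotc (seg : List String) :
    rollSeg seg = (seg.map dotc).take (seg.length - seg.count "O")
      ++ List.replicate (seg.count "O") "O" := rfl

theorem neg_nohash (m : List String) (hm : "#" ∉ m) : neg m = rollSeg m := by
  induction m using List.reverseRecOn with
  | nil =>
    rw [neg, negOuterGo_nonpos _ _ _ (by simp)]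
    simp [rollSeg]
  | append_singleton u x _ =>
    have hx : x ≠ "#" := by intro h; exact hm (by simp [h])
    have hu : "#" ∉ u := fun h => hm (by simp [h])
    rw [neg]
    rw [show ((((u ++ [x]).length : Int) - 1).toNat) + 1 = u.length + 1 by
      simp only [List.length_append, List.length_cons, List.length_nil]; omega]
    have hidx : (((u ++ [x]).length : Int)) - 1 = (u.length : Int) := by simp
    rw [hidx]
    by_cases hu0 : u = []
    · subst hu0
      rw [negOuterGo_nonpos _ _ _ (by simp)]
      simp [rollSeg_eq_dotc]
      by_cases hO : x = "O" <;> simp [hO, dotc]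
    · have hpos : 0 < (u.length : Int) := by
        have := List.length_pos_iff.2 hu0; omega
      rw [negOuterGo, if_pos hpos]
      rw [negInner_none u x 0 hu hx]
      have hlenv : ((u ++ [x]).map dotc).length = u.length + 1 := by simp
      set cnt := (u ++ [x]).count "O" with hcnt
      have hcle : cnt ≤ u.length + 1 := by
        have h : (u ++ [x]).count "O" ≤ (u ++ [x]).length := List.count_le_length
        rw [hcnt]; simpa using h
      by_cases hc0 : cnt = 0
      · simp only [hc0, Nat.cast_zero, zero_add]
        norm_num
        rw [negOuterGo_nonpos _ _ _ (by omega)]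
        rw [rollSeg_eq_dotc, ← hcnt, hc0]
        simp [List.take_of_length_le]
      · have hcne : ((cnt : Nat) : Int) ≠ 0 := Int.natCast_ne_zero.mpr hc0
        rw [show ((0:Int) + (cnt:Int)) = (cnt:Int) from zero_add _]
        dsimp only
        rw [if_pos hcne]
        have hv : (u.length : Int) = ((((u ++ [x]).map dotc).length : Int)) - 1 := by
          rw [hlenv]; push_cast; ring
        rw [hv, backfill_eq _ cnt (by rw [hlenv]; exact hcle)]
        rw [negOuterGo_nonpos _ _ _ (by omega)]
        rw [rollSeg_eq_dotc, ← hcnt, hlenv]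
        simp

theorem neg_split (p s : List String) (hs : "#" ∉ s) :
    neg (p ++ "#" :: s) = neg p ++ "#" :: rollSeg s := by
  by_cases htriv : p = [] ∧ s = []
  · obtain ⟨hp, hsn⟩ := htriv
    subst hp; subst hsn
    rw [neg, neg, negOuterGo_nonpos _ _ _ (by simp), negOuterGo_nonpos _ _ _ (by simp)]
    simp [rollSeg]
  · have hidx : (((p ++ "#" :: s).length : Int)) - 1 = (p.length : Int) + (s.length : Int) := by
      simp; ring
    have hpos : 0 < (p.length : Int) + (s.length : Int) := by
      rcases List.eq_nil_or_concat p with hp | ⟨_, _, rfl⟩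
      · rcases List.eq_nil_or_concat s with hsn | ⟨_, _, rfl⟩
        · exact absurd ⟨hp, hsn⟩ htriv
        · simp; omega
      · simp; omega
    rw [neg]
    rw [show ((((p ++ "#" :: s).length : Int) - 1).toNat) + 1 = p.length + s.length + 1 by
      simp only [List.length_append, List.length_cons]; omega]
    rw [hidx, negOuterGo, if_pos hpos]
    rw [negInner_hash p s 0 hs]
    dsimp only
    set cnt := s.count "O" with hcnt
    have hcle : cnt ≤ s.length := by
      have h : s.count "O" ≤ s.length := List.count_le_length
      omega
    rw [show ((0:Int) + (cnt:Int)) = (cnt:Int) from zero_add _]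
    have hassoc : p ++ "#" :: s.map dotc = (p ++ ["#"]) ++ s.map dotc := by simp
    have hfin : ∀ w : List String,
        negOuterGo (p.length + s.length) (p ++ w) ((p.length : Int) - 1) = neg p ++ w := by
      intro w
      rw [negOuterGo_append _ p w _ (by omega), neg]
      rw [negOuterGo_fuel (p.length + s.length) ((((p.length : Int) - 1).toNat) + 1) p
          ((p.length : Int) - 1) (by omega) (by omega)]
    by_cases hc0 : cnt = 0
    · rw [if_neg (by simp [hc0])]
      have hroll : rollSeg s = s.map dotc := by
        rw [rollSeg_eq_dotc, ← hcnt, hc0]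
        simp [List.take_of_length_le]
      rw [show p ++ "#" :: s.map dotc = p ++ ("#" :: s.map dotc) from rfl]
      rw [hfin ("#" :: s.map dotc), hroll]
    · rw [if_pos (Int.natCast_ne_zero.mpr hc0)]
      have hvlen : (p ++ "#" :: s.map dotc).length = p.length + 1 + s.length := by
        simp; omega
      have hv : (p.length : Int) + (s.length : Int) =
          (((p ++ "#" :: s.map dotc).length : Int)) - 1 := by
        rw [hvlen]; push_cast; ring
      rw [hv, backfill_eq _ cnt (by rw [hvlen]; omega)]
      have htake : (p ++ "#" :: s.map dotc).take ((p ++ "#" :: s.map dotc).length - cnt)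
          ++ List.replicate cnt "O" = p ++ "#" :: rollSeg s := by
        rw [hvlen]
        have h1 : p.length + 1 + s.length - cnt = (p ++ ["#"]).length + (s.length - cnt) := by
          simp; omega
        rw [hassoc, h1, List.take_append]
        rw [rollSeg_eq_dotc, ← hcnt]
        rw [List.take_of_length_le (by simp)]
        simp
      rw [htake]
      rw [show p ++ "#" :: rollSeg s = p ++ ("#" :: rollSeg s) from rfl]
      exact hfin ("#" :: rollSeg s)

theorem negAlt_nohash_fold (s : List String) (o g : List String) (hs : "#" ∉ s) :
    s.foldl negAltStep (o, g) = (o, g ++ s) := by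
  induction s generalizing g with
  | nil => simp
  | cons x s ih =>
    have hx : x ≠ "#" := by intro h; exact hs (by simp [h])
    simp only [List.foldl_cons, negAltStep, if_neg hx]
    rw [ih _ (fun h => hs (by simp [h]))]
    simp

theorem negAlt_nohash (m : List String) (hm : "#" ∉ m) : neg_alt m = rollSeg m := by
  simp [neg_alt, negAlt_nohash_fold m [] [] hm]

theorem negAlt_split (p s : List String) (hs : "#" ∉ s) :
    neg_alt (p ++ "#" :: s) = neg_alt p ++ "#" :: rollSeg s := by
  show ((p ++ "#" :: s).foldl negAltStep ([], [])).1 ++ rollSeg ((p ++ "#" :: s).foldl negAltStep ([], [])).2 = _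
  rw [List.foldl_append, List.foldl_cons]
  rw [show negAltStep (p.foldl negAltStep ([], [])) "#" =
      ((p.foldl negAltStep ([], [])).1 ++ rollSeg (p.foldl negAltStep ([], [])).2 ++ ["#"], []) from
    if_pos rfl]
  rw [negAlt_nohash_fold s _ [] hs]
  show _ ++ rollSeg s = (_ ++ rollSeg _) ++ "#" :: rollSeg s
  simp

theorem neg_eq_alt (m : List String) : neg m = neg_alt m := by
  have last_hash_split : ∀ m : List String, "#" ∈ m →
      ∃ p s, m = p ++ "#" :: s ∧ "#" ∉ s := by
    intro m hm
    induction m using List.reverseRecOn with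
    | nil => simp at hm
    | append_singleton t x ih =>
      by_cases hx : x = "#"
      · exact ⟨t, [], by simp [hx], by simp⟩
      · have ht : "#" ∈ t := by
          rcases List.mem_append.1 hm with h | h
          · exact h
          · simp at h; exact absurd h.symm hx
        obtain ⟨p, s, hps, hns⟩ := ih ht
        exact ⟨p, s ++ [x], by simp [hps], by
          intro hmem
          rcases List.mem_append.1 hmem with h | h
          · exact hns h
          · simp at h; exact hx h.symm⟩
  have key : ∀ n : Nat, ∀ m : List String, m.length ≤ n → neg m = neg_alt m := by
    intro n
    induction n with
    | zero =>
      intro m hn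
      have : m = [] := List.eq_nil_of_length_eq_zero (by omega)
      subst this
      rw [neg_nohash [] (by simp), negAlt_nohash [] (by simp)]
    | succ n ih =>
      intro m hn
      by_cases hm : "#" ∈ m
      · obtain ⟨p, s, rfl, hns⟩ := last_hash_split m hm
        rw [neg_split p s hns, negAlt_split p s hns, ih p (by simp at hn; omega)]
      · rw [neg_nohash m hm, negAlt_nohash m hm]
  exact key m.length m le_rfl

-- ===== VERDICT (by name: the statement is the Claim_ definition above) =====
theorem neg_spec : Claim_equal_neg := by
  intro m _
  show neg m = neg_alt m
  exact neg_eq_alt m
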